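-- pv_equiv track=rewrite | github.com/QGarot/habbo-font | src/letters_data.py | get_letter_size
-- ===== SOURCE A (Python) =====
-- data = [('a', 30), ('b', 30), ('c', 30), ('d', 30), ('e', 30), ('f', 30), ('g', 30), ('h', 30), ('i', 20), ('j', 28),
--         ('k', 30), ('l', 28), ('m', 40), ('n', 30), ('o', 30), ('p', 30), ('q', 30), ('r', 30), ('s', 30), ('t', 30),
--         ('u', 30), ('v', 30), ('w', 40), ('x', 30), ('y', 30), ('z', 30)]
--
-- def get_letter_size(x: str) -> int:
--     if len(x) == 1:
--         for letter, size in data: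
--             if letter == x:
--                 return size
--         return 0
--     else:
--         return 0
-- ===== SOURCE B (Python) =====
-- # Closed-form arithmetic: width = 30 adjusted by indicator terms for the five deviating
-- # letters, guarded by a character-range comparison instead of any table.
-- def get_letter_size(x: str) -> int:
--     if len(x) == 1 and 'a' <= x <= 'z':
--         return 30 - 10 * (x == 'i') - 2 * (x in 'jl') + 10 * (x in 'mw')
--     return 0
-- ===== Notes on version B (the rewrite author's own statement) =====
-- stated objective: simpler
-- what changed: Replaces the 26-entry table and its linear scan with a closed-form arithmetic expression: a lowercase character-range guard plus the common width 30 corrected by indicator terms for the five deviating letters.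
import Mathlib
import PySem

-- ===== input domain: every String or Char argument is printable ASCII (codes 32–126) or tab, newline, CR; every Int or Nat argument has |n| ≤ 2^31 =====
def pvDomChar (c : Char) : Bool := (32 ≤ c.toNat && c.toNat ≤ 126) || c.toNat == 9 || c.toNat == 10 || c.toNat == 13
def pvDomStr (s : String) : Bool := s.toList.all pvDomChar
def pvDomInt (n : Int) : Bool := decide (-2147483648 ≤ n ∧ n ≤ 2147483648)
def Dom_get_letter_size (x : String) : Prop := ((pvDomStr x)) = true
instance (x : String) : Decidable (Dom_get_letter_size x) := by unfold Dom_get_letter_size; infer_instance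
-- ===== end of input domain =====

-- B replaces A's 26-entry table scan with a closed-form arithmetic expression (char-range
-- guard plus indicator corrections to the common width 30); objective: simpler.

-- ===== PORT A =====
-- Python's one-character strings in `data` are ported on the List Char side
-- (exact: string equality is char-list equality).
def pvData : List (List Char × Int) :=
  [(['a'],30),(['b'],30),(['c'],30),(['d'],30),(['e'],30),(['f'],30),(['g'],30),(['h'],30),(['i'],20),(['j'],28),
   (['k'],30),(['l'],28),(['m'],40),(['n'],30),(['o'],30),(['p'],30),(['q'],30),(['r'],30),(['s'],30),(['t'],30),
   (['u'],30),(['v'],30),(['w'],40),(['x'],30),(['y'],30),(['z'],30)]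

-- the `for letter, size in data: if letter == x: return size` loop with its `return 0` fall-through
def pvScan : List (List Char × Int) → List Char → Int
  | [], _ => 0
  | (l, s) :: rest, cs => if l == cs then s else pvScan rest cs

def get_letter_size (x : String) : Int :=
  if PySem.Str.len x == 1 then pvScan pvData x.toList else 0

-- ===== PORT B =====
-- Python lexicographic string `<=`, ported by hand step for step (exact: Python compares
-- strings by code points, shorter prefix first).
def pvStrLe : List Char → List Char → Bool
  | [], _ => true
  | _ :: _, [] => false
  | a :: as, b :: bs => if a == b then pvStrLe as bs else decide (a < b)

-- Python bool used in arithmetic (True = 1, False = 0)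
def pvB (b : Bool) : Int := if b then 1 else 0

def get_letter_size_alt (x : String) : Int :=
  if PySem.Str.len x == 1 && pvStrLe ['a'] x.toList && pvStrLe x.toList ['z'] then
    30 - 10 * pvB (x.toList == ['i'])
       - 2 * pvB (PySem.Chars.isIn x.toList ['j','l'])
       + 10 * pvB (PySem.Chars.isIn x.toList ['m','w'])
  else 0

-- ===== PRECONDITION & SPEC =====
def Spec_get_letter_size (x : String) (out : Int) : Prop := out = get_letter_size_alt x
instance (x : String) (out : Int) : Decidable (Spec_get_letter_size x out) := by unfold Spec_get_letter_size; infer_instance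

-- ===== CLAIM (what is proved, stated in full; the proofs are below) =====
def Claim_equal_get_letter_size : Prop := ∀ (x : String), Dom_get_letter_size x → Spec_get_letter_size x (get_letter_size x)

-- ===== LEMMAS AND PROOFS =====

-- the lowercase range 97–122 is exactly the 26 letters
theorem pv_range_mem (c : Char) (h1 : 97 ≤ c.toNat) (h2 : c.toNat ≤ 122) :
    c ∈ ['a','b','c','d','e','f','g','h','i','j','k','l','m','n','o','p','q','r','s','t','u','v','w','x','y','z'] := by
  rw [← Char.ofNat_toNat c]
  set n := c.toNat with hn
  interval_cases n <;> decide

-- the two range comparisons of B's guard, read back as code-point bounds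
theorem pv_le_lo (c : Char) (h : pvStrLe ['a'] [c] = true) : 97 ≤ c.toNat := by
  by_cases he : (('a':Char) == c) = true
  · have : c = 'a' := (beq_iff_eq.mp he).symm
    subst this; decide
  · simp [pvStrLe, he] at h
    simp [Char.lt_def, UInt32.lt_iff_toNat_lt] at h
    exact Nat.le_of_lt (by simpa using h)

theorem pv_le_hi (c : Char) (h : pvStrLe [c] ['z'] = true) : c.toNat ≤ 122 := by
  by_cases he : ((c:Char) == 'z') = true
  · have : c = 'z' := beq_iff_eq.mp he
    subst this; decide
  · simp [pvStrLe, he] at h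
    simp [Char.lt_def, UInt32.lt_iff_toNat_lt] at h
    exact Nat.le_of_lt (by simpa using h)

theorem pv_single (c : Char) :
    pvScan pvData [c] = get_letter_size_alt (String.ofList [c]) := by
  by_cases hm : c ∈ ['a','b','c','d','e','f','g','h','i','j','k','l','m','n','o','p','q','r','s','t','u','v','w','x','y','z']
  · fin_cases hm <;> decide
  · have hr : ¬ (97 ≤ c.toNat ∧ c.toNat ≤ 122) := fun ⟨h1, h2⟩ => hm (pv_range_mem c h1 h2)
    have hgen : ∀ L : List (List Char × Int), (∀ p ∈ L, p.1 ≠ [c]) → pvScan L [c] = 0 := by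
      intro L hL
      induction L with
      | nil => rfl
      | cons p rest ih =>
        obtain ⟨l, v⟩ := p
        have hne : l ≠ [c] := hL (l, v) (List.mem_cons_self)
        simp only [pvScan]
        rw [if_neg (by simpa using hne)]
        exact ih fun q hq => hL q (List.mem_cons_of_mem _ hq)
    have hscan : pvScan pvData [c] = 0 := by
      apply hgen
      intro p hp
      fin_cases hp <;>
        (simp only [ne_eq, List.cons.injEq, and_true]; intro h; exact hm (h ▸ (by decide)))
    rw [hscan]
    unfold get_letter_size_alt
    rw [if_neg]
    intro hg
    simp only [Bool.and_eq_true] at hg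
    exact hr ⟨pv_le_lo c (by simpa using hg.1.2), pv_le_hi c (by simpa using hg.2)⟩

-- ===== VERDICT (by name: the statement is the Claim_ definition above) =====
theorem get_letter_size_spec : Claim_equal_get_letter_size := by
  intro x _
  unfold Spec_get_letter_size get_letter_size
  by_cases hlen : (PySem.Str.len x == 1) = true
  · have hl : x.toList.length = 1 := by
      have := beq_iff_eq.mp hlen
      simpa [PySem.Str.len_eq] using this
    obtain ⟨c, hc⟩ : ∃ c, x.toList = [c] := List.length_eq_one_iff.mp hl
    have hx : x = String.ofList [c] := by rw [← hc, String.ofList_toList]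
    rw [hx, if_pos (by rw [hx] at hlen; exact hlen)]
    simpa using pv_single c
  · rw [if_neg hlen]
    unfold get_letter_size_alt
    rw [if_neg ?_]
    intro h
    simp only [Bool.and_eq_true] at h
    exact hlen h.1.1
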